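-- pv_equiv track=rewrite | github.com/farzanhlhvr/Backend-Lead-Scoring | app/scoring.py | role_score
-- ===== SOURCE A (Python) =====
-- def role_score(role: str) -> int:
--     if not role: return 0
--     role = role.lower()
--     decision = ["ceo","founder","cto","head of","chief","director","vp","president"]
--     influencer = ["manager","lead","senior","growth","marketing","sales"]
--     if any(k in role for k in decision): return 20
--     if any(k in role for k in influencer): return 10
--     return 0
-- ===== SOURCE B (Python) =====
-- _TIERS = {
--     "ceo": 20, "founder": 20, "cto": 20, "head of": 20, "chief": 20,
--     "director": 20, "vp": 20, "president": 20,
--     "manager": 10, "lead": 10, "senior": 10, "growth": 10,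
--     "marketing": 10, "sales": 10,
-- }
--
-- def role_score(role: str) -> int:
--     if not role:
--         return 0
--     r = role.lower()
--     return max((score for kw, score in _TIERS.items() if kw in r), default=0)
-- ===== Notes on version B (the rewrite author's own statement) =====
-- stated objective: simpler
-- what changed: Replaces the two sequential any() scans over separate keyword lists by a single keyword->tier table and one max-aggregation over matching keywords (default 0), with 20 > 10 encoding the decision>influencer priority.
import Mathlib
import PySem

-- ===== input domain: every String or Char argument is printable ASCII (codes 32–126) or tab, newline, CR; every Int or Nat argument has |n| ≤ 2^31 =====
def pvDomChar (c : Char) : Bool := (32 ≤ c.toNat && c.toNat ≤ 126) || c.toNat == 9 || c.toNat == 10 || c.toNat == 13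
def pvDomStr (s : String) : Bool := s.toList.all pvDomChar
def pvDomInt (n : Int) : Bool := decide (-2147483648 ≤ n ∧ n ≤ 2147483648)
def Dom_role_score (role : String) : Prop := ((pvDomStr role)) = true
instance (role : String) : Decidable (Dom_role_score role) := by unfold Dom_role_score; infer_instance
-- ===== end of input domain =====

-- B replaces A's two sequential any() scans by one keyword→tier table and a single
-- max-aggregation over the matching keywords (objective: simpler).

-- ===== PORT A =====
def role_score (role : String) : Int :=
  if PySem.Str.len role = 0 then 0
  else
    let r := PySem.Str.lower role
    let decision := ["ceo","founder","cto","head of","chief","director","vp","president"]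
    let influencer := ["manager","lead","senior","growth","marketing","sales"]
    if decision.any (fun k => PySem.Str.isIn k r) then 20
    else if influencer.any (fun k => PySem.Str.isIn k r) then 10
    else 0

-- ===== PORT B =====
def tiers_role_score : List (String × Int) :=
  [("ceo",20),("founder",20),("cto",20),("head of",20),("chief",20),
   ("director",20),("vp",20),("president",20),
   ("manager",10),("lead",10),("senior",10),("growth",10),
   ("marketing",10),("sales",10)]

def role_score_alt (role : String) : Int :=
  if PySem.Str.len role = 0 then 0
  else
    let r := PySem.Str.lower role
    ((tiers_role_score.filter (fun p => PySem.Str.isIn p.1 r)).map Prod.snd).foldl max 0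

-- ===== PRECONDITION & SPEC =====
def Spec_role_score (role : String) (out : Int) : Prop := out = role_score_alt role
instance (role : String) (out : Int) : Decidable (Spec_role_score role out) := by unfold Spec_role_score; infer_instance

-- ===== CLAIM (what is proved, stated in full; the proofs are below) =====
def Claim_equal_role_score : Prop := ∀ (role : String), Dom_role_score role → Spec_role_score role (role_score role)

-- ===== LEMMAS AND PROOFS =====

-- folding max over a constant-valued list
theorem foldl_max_all_eq (l : List Int) (a c : Int) (h : ∀ x ∈ l, x = c) :
    l.foldl max a = if l = [] then a else max a c := by
  induction l generalizing a with
  | nil => simp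
  | cons y t ih =>
      have hy : y = c := h y (by simp)
      have ht : ∀ x ∈ t, x = c := fun x hx => h x (by simp [hx])
      rw [List.foldl_cons, hy, ih _ ht]
      by_cases htn : t = [] <;> simp [htn]

theorem role_score_spec : Claim_equal_role_score := by
  unfold Claim_equal_role_score Spec_role_score
  intro role _
  unfold role_score role_score_alt
  by_cases h0 : PySem.Str.len role = 0
  · rw [if_pos h0, if_pos h0]
  · rw [if_neg h0, if_neg h0]
    dsimp only
    set r := PySem.Str.lower role with hr
    set pd : String → Bool := fun k => PySem.Str.isIn k r with hpd
    set d : List String := ["ceo","founder","cto","head of","chief","director","vp","president"] with hd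
    set i : List String := ["manager","lead","senior","growth","marketing","sales"] with hi
    have htab : tiers_role_score
        = d.map (fun k => (k, (20 : Int))) ++ i.map (fun k => (k, (10 : Int))) := rfl
    -- rewrite B's computation as two constant-valued blocks
    have hB : ((tiers_role_score.filter (fun p => PySem.Str.isIn p.1 r)).map Prod.snd)
        = ((d.filter pd).map (fun _ => (20 : Int))) ++ ((i.filter pd).map (fun _ => (10 : Int))) := by
      have e1 : ((fun p : String × Int => PySem.Str.isIn p.1 r) ∘ (fun k => (k, (20 : Int)))) = pd := rfl
      have e2 : ((fun p : String × Int => PySem.Str.isIn p.1 r) ∘ (fun k => (k, (10 : Int)))) = pd := rfl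
      have s1 : (Prod.snd ∘ (fun k : String => (k, (20 : Int)))) = fun _ => (20 : Int) := rfl
      have s2 : (Prod.snd ∘ (fun k : String => (k, (10 : Int)))) = fun _ => (10 : Int) := rfl
      rw [htab, List.filter_append, List.map_append, List.filter_map, List.filter_map,
          List.map_map, List.map_map, e1, e2, s1, s2]
    rw [hB, List.foldl_append]
    have h20 : ∀ x ∈ (d.filter pd).map (fun _ => (20 : Int)), x = 20 := by
      intro x hx; rcases List.mem_map.mp hx with ⟨_, _, hx20⟩; omega
    have h10 : ∀ x ∈ (i.filter pd).map (fun _ => (10 : Int)), x = 10 := by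
      intro x hx; rcases List.mem_map.mp hx with ⟨_, _, hx10⟩; omega
    rw [foldl_max_all_eq _ _ 20 h20]
    by_cases hda : d.any pd = true
    · -- some decision keyword matches: both sides are 20
      have hdf : d.filter pd ≠ [] := by
        rw [ne_eq, List.filter_eq_nil_iff]
        intro hall
        rcases List.any_eq_true.mp hda with ⟨k, hk, hpk⟩
        exact absurd hpk (by simpa using hall k hk)
      rw [if_pos hda, if_neg (by simpa using hdf)]
      rw [foldl_max_all_eq _ _ 10 h10]
      by_cases hif : i.filter pd = [] <;> simp [hif]
    · -- no decision keyword matches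
      have hdf : d.filter pd = [] := by
        rw [List.filter_eq_nil_iff]
        intro k hk hpk
        exact hda (List.any_eq_true.mpr ⟨k, hk, hpk⟩)
      rw [if_neg hda, hdf, foldl_max_all_eq _ _ 10 h10]
      by_cases hia : i.any pd = true
      · have hif : i.filter pd ≠ [] := by
          rw [ne_eq, List.filter_eq_nil_iff]
          intro hall
          rcases List.any_eq_true.mp hia with ⟨k, hk, hpk⟩
          exact absurd hpk (by simpa using hall k hk)
        rw [if_pos hia]
        simp [hif]
      · have hif : i.filter pd = [] := by
          rw [List.filter_eq_nil_iff]
          intro k hk hpk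
          exact hia (List.any_eq_true.mpr ⟨k, hk, hpk⟩)
        rw [if_neg hia]
        simp [hif]
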